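-- pv_equiv track=rewrite | github.com/seecr/meresco-components | merescocomponents/web/googlelikeparse.py | isGoogleLikePlusMinusQuery
-- ===== SOURCE A (Python) =====
-- def isGoogleLikePlusMinusQuery(aString):
--     googleLike = False
--     for part in aString.lower().split():
--         if part in ['and', 'or', 'not']:
--             googleLike = False
--             break
--         elif part[0] == '(' or part[-1] == ')':
--             googleLike = False
--             break
--         elif part[0] in ['-', '+']:
--             googleLike = True
--     return googleLike
-- ===== SOURCE B (Python) =====
-- def isGoogleLikePlusMinusQuery(aString):
--     parts = aString.lower().split()
--     if any(p in ('and', 'or', 'not') or p[0] == '(' or p[-1] == ')' for p in parts):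
--         return False
--     return any(p[0] in '-+' for p in parts)
-- ===== Notes on version B (the rewrite author's own statement) =====
-- stated objective: simpler
-- what changed: Replaces the stateful accumulator-plus-break loop with two independent existence scans over the split word list: False if any word disqualifies the query, else True iff some word starts with a plus or minus sign (correct because the result is order-independent).
import Mathlib
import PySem

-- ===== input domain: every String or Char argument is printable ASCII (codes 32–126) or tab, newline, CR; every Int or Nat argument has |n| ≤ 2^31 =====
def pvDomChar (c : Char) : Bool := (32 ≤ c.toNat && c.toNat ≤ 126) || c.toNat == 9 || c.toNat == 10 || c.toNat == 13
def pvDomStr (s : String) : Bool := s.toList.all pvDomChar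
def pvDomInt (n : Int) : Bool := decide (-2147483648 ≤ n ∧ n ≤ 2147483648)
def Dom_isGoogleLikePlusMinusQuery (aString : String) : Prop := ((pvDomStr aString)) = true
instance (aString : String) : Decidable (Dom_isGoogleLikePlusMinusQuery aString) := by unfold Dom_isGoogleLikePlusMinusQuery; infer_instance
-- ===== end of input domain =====

-- B replaces the single break/accumulator loop with two independent existence scans (objective: simpler).


-- ===== PORT A =====
-- loop of A: accumulator googleLike, break = return false
def pvLoopA : List String → Bool → Bool
  | [], g => g
  | p :: rest, g =>
    if p = "and" ∨ p = "or" ∨ p = "not" then false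
    else if PySem.Str.pyGet? p 0 = some '(' ∨ PySem.Str.pyGet? p (-1) = some ')' then false
    else if PySem.Str.pyGet? p 0 = some '-' ∨ PySem.Str.pyGet? p 0 = some '+' then pvLoopA rest true
    else pvLoopA rest g

def isGoogleLikePlusMinusQuery (aString : String) : Bool :=
  pvLoopA (PySem.Str.split₀ (PySem.Str.lower aString)) false

-- ===== PORT B =====
-- B: two independent existence scans over the word list
def pvDisq (p : String) : Bool :=
  p == "and" || p == "or" || p == "not"
    || PySem.Str.pyGet? p 0 == some '(' || PySem.Str.pyGet? p (-1) == some ')'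

def pvPlusMinus (p : String) : Bool :=
  PySem.Str.pyGet? p 0 == some '-' || PySem.Str.pyGet? p 0 == some '+'

def isGoogleLikePlusMinusQuery_alt (aString : String) : Bool :=
  let parts := PySem.Str.split₀ (PySem.Str.lower aString)
  if parts.any pvDisq then false
  else parts.any pvPlusMinus

-- ===== PRECONDITION & SPEC =====
def Spec_isGoogleLikePlusMinusQuery (aString : String) (out : Bool) : Prop := out = isGoogleLikePlusMinusQuery_alt aString
instance (aString : String) (out : Bool) : Decidable (Spec_isGoogleLikePlusMinusQuery aString out) := by unfold Spec_isGoogleLikePlusMinusQuery; infer_instance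

-- ===== CLAIM (what is proved, stated in full; the proofs are below) =====
def Claim_equal_isGoogleLikePlusMinusQuery : Prop := ∀ (aString : String), Dom_isGoogleLikePlusMinusQuery aString → Spec_isGoogleLikePlusMinusQuery aString (isGoogleLikePlusMinusQuery aString)

-- ===== LEMMAS AND PROOFS =====

-- ===== VERDICT (by name: the statement is the Claim_ definition above) =====
lemma pvLoopA_eq (ps : List String) (g : Bool) :
    pvLoopA ps g = if ps.any pvDisq then false else (g || ps.any pvPlusMinus) := by
  induction ps generalizing g with
  | nil => simp [pvLoopA]
  | cons p rest ih =>
    simp only [pvLoopA]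
    by_cases h1 : p = "and" ∨ p = "or" ∨ p = "not"
    · rcases h1 with h | h | h <;> simp [pvDisq, h]
    · by_cases h2 : PySem.Str.pyGet? p 0 = some '(' ∨ PySem.Str.pyGet? p (-1) = some ')'
      · rcases h2 with h | h <;> simp_all [pvDisq, h]
      · have hd : pvDisq p = false := by
          simp only [pvDisq, Bool.or_eq_false_iff, beq_eq_false_iff_ne, ne_eq]
          push_neg at h1 h2
          refine ⟨⟨⟨⟨h1.1, h1.2.1⟩, h1.2.2⟩, h2.1⟩, h2.2⟩
        by_cases h3 : PySem.Str.pyGet? p 0 = some '-' ∨ PySem.Str.pyGet? p 0 = some '+'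
        · have hp : pvPlusMinus p = true := by
            simp only [pvPlusMinus, Bool.or_eq_true, beq_iff_eq]
            exact h3
          simp only [PySem.Str.pyGet?_eq, PySem.Chars.pyGet?_eq_listPyGet?] at h2 h3
          simp [h1, h2, h3, ih, hd, hp]
        · have hp : pvPlusMinus p = false := by
            simp only [pvPlusMinus, Bool.or_eq_false_iff, beq_eq_false_iff_ne, ne_eq]
            push_neg at h3
            exact h3
          simp only [PySem.Str.pyGet?_eq, PySem.Chars.pyGet?_eq_listPyGet?] at h2 h3
          simp [h1, h2, h3, ih, hd, hp]

theorem isGoogleLikePlusMinusQuery_spec : Claim_equal_isGoogleLikePlusMinusQuery := by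
  intro s _
  unfold Spec_isGoogleLikePlusMinusQuery isGoogleLikePlusMinusQuery isGoogleLikePlusMinusQuery_alt
  rw [pvLoopA_eq]
  simp
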